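-- pv_equiv track=rewrite | github.com/krishverma1406-eng/JAKATA | jarvis/tools/task_manager.py | _group_by_project
-- ===== SOURCE A (Python) =====
-- from typing import Any
--
-- def _group_by_project(tasks: list[dict[str, Any]]) -> dict[str, list[str]]:
--     groups: dict[str, list[str]] = {}
--     for task in tasks:
--         project = str(task.get("project", "General")).strip() or "General"
--         title = str(task.get("title", "")).strip()
--         if not title:
--             continue
--         groups.setdefault(project, []).append(title)
--     return groups
-- ===== SOURCE B (Python) =====
-- def _group_by_project(tasks):
--     pairs = []
--     for task in tasks:
--         project = str(task.get("project", "General")).strip() or "General"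
--         title = str(task.get("title", "")).strip()
--         if title:
--             pairs.append((project, title))
--     projects = []
--     for p, _ in pairs:
--         if p not in projects:
--             projects.append(p)
--     return {p: [t for q, t in pairs if q == p] for p in projects}
-- ===== Notes on version B (the rewrite author's own statement) =====
-- stated objective: alternative
-- what changed: Replaced the single-pass dict.setdefault fold by a two-phase pipeline: build a flat list of cleaned (project, title) pairs, dedup the project keys in first-occurrence order, then emit each group with a per-key scan of the pair list.
import Mathlib
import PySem

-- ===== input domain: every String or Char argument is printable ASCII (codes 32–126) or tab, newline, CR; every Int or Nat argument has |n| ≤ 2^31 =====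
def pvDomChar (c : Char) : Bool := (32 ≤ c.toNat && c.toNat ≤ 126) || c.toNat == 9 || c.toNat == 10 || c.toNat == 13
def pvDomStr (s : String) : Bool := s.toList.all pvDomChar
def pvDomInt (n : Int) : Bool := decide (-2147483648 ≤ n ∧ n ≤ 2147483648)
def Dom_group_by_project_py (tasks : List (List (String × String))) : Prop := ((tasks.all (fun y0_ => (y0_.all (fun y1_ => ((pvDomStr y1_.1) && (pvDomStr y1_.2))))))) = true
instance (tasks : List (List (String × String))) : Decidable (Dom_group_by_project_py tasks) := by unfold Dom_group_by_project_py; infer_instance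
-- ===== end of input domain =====

-- B replaces A's incremental dict.setdefault fold by a clean-pairs / dedup-keys / per-key-scan
-- pipeline (an alternative decomposition, not faster). Return-value equivalence only.

-- ===== PORT A =====
-- task.get(k, dflt) on the association list representing the Python dict (first match)
def pvTaskGet (task : List (String × String)) (k dflt : String) : String :=
  (task.lookup k).getD dflt

-- 'str(task.get("project", "General")).strip() or "General"' (str() is identity on str)
def pvProject (task : List (String × String)) : String :=
  let p := PySem.Str.strip (pvTaskGet task "project" "General")
  if p = "" then "General" else p

-- 'str(task.get("title", "")).strip()'
def pvTitle (task : List (String × String)) : String :=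
  PySem.Str.strip (pvTaskGet task "title" "")

def group_by_project_py (tasks : List (List (String × String))) : List (String × List String) :=
  (tasks.foldl (fun groups task =>
      let project := pvProject task
      let title := pvTitle task
      if title = "" then groups
      else groups.modify project [] (· ++ [title]))
    PySem.Dict.empty).items

-- ===== PORT B =====
-- first loop of Source B: the cleaned (project, title) pairs
def pvPairs (tasks : List (List (String × String))) : List (String × String) :=
  tasks.foldl (fun pairs task =>
      let project := pvProject task
      let title := pvTitle task
      if title = "" then pairs else pairs ++ [(project, title)])
    []

def group_by_project_py_alt (tasks : List (List (String × String))) : List (String × List String) :=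
  let pairs := pvPairs tasks
  -- second loop: 'if p not in projects: projects.append(p)' = set-style ordered dedup
  let projects := pairs.foldl (fun s q => PySem.Set.add s q.1) []
  -- final dict comprehension
  projects.map (fun p => (p, (pairs.filter (fun q => q.1 == p)).map (·.2)))

-- ===== PRECONDITION & SPEC =====
def Spec_group_by_project_py (tasks : List (List (String × String))) (out : List (String × List String)) : Prop := out = group_by_project_py_alt tasks
instance (tasks : List (List (String × String))) (out : List (String × List String)) : Decidable (Spec_group_by_project_py tasks out) := by unfold Spec_group_by_project_py; infer_instance

-- ===== CLAIM (what is proved, stated in full; the proofs are below) =====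
def Claim_equal_group_by_project_py : Prop := ∀ (tasks : List (List (String × String))), Dom_group_by_project_py tasks → Spec_group_by_project_py tasks (group_by_project_py tasks)

-- ===== LEMMAS AND PROOFS =====

-- pvPairs' foldl only appends: the accumulator factors out
theorem pvPairs_acc (tasks : List (List (String × String))) (acc : List (String × String)) :
    tasks.foldl (fun pairs task =>
      let project := pvProject task
      let title := pvTitle task
      if title = "" then pairs else pairs ++ [(project, title)]) acc
    = acc ++ pvPairs tasks := by
  induction tasks generalizing acc with
  | nil => simp [pvPairs]
  | cons t ts ih =>
    simp only [pvPairs, List.foldl_cons]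
    rw [ih, ih (if _ = "" then [] else _)]
    split <;> simp

-- A's dict loop over tasks is the modify-append loop over the cleaned pairs
theorem A_fold_eq (tasks : List (List (String × String))) (d : PySem.Dict String (List String)) :
    tasks.foldl (fun groups task =>
      let project := pvProject task
      let title := pvTitle task
      if title = "" then groups
      else groups.modify project [] (· ++ [title])) d
    = (pvPairs tasks).foldl (fun g p => g.modify p.1 [] (· ++ [p.2])) d := by
  induction tasks generalizing d with
  | nil => simp [pvPairs]
  | cons t ts ih =>
    simp only [pvPairs, List.foldl_cons]
    rw [ih, pvPairs_acc]
    by_cases h : pvTitle t = "" <;> simp [h]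

theorem pv_main (tasks : List (List (String × String))) : Spec_group_by_project_py tasks (group_by_project_py tasks) := by
  unfold Spec_group_by_project_py group_by_project_py group_by_project_py_alt
  rw [A_fold_eq]
  set pairs := pvPairs tasks with hp
  have hnd : ((pairs.foldl (fun g p => g.modify p.1 [] (· ++ [p.2]))
      (PySem.Dict.empty : PySem.Dict String (List String))).keys).Nodup :=
    PySem.Dict.nodup_keys_foldl_modify_key pairs (·.1) [] (fun g p => (· ++ [p.2]))
      PySem.Dict.empty PySem.Dict.nodup_keys_empty
  have hfold : pairs.foldl (fun s q => PySem.Set.add s q.1) [] =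
      PySem.Set.ofList (pairs.map Prod.fst) := by
    rw [← PySem.Set.update_map_eq_foldl_add, PySem.Set.update_nil_left]
  have hkeys : (PySem.Dict.empty : PySem.Dict String (List String)).keys = [] := rfl
  rw [PySem.Dict.items_eq_map_keys _ hnd [], PySem.Dict.keys_foldl_modify_key, hkeys,
    PySem.Set.update_nil_left]
  show _ = (pairs.foldl (fun s q => PySem.Set.add s q.1) []).map
      (fun p => (p, (pairs.filter (fun q => q.1 == p)).map (fun x => x.2)))
  rw [hfold]
  refine List.map_congr_left ?_
  intro k _
  rw [PySem.Dict.getD_foldl_modify_append]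
  simp [PySem.Dict.getD_empty]

-- ===== VERDICT (by name: the statement is the Claim_ definition above) =====
theorem group_by_project_py_spec : Claim_equal_group_by_project_py := fun tasks _ => pv_main tasks
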